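-- pv_equiv track=rewrite | github.com/Gopher-Industries/NutriHelp-AI | nutrihelp_ai/routers/test.py | filter_budget
-- ===== SOURCE A (Python) =====
-- def filter_budget(meals, budget):
--     if budget is None:
--         budget = "medium"
--     budget = str(budget).lower()
--
--     # preference order (fallback)
--     if budget == "low":
--         preferred_orders = [["cost_low"], ["cost_low", "cost_medium"], [
--             "cost_low", "cost_medium", "cost_high"]]
--     elif budget == "medium":
--         preferred_orders = [["cost_medium"], ["cost_medium", "cost_low"], [
--             "cost_medium", "cost_low", "cost_high"]]
--     else:
--         # high budget: no need to restrict
--         return meals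
--
--     # Try strict first, then relax
--     for allowed in preferred_orders:
--         filtered = []
--         for meal in meals:
--             tags = meal.get("tags", [])
--             if any(cost_tag in tags for cost_tag in allowed):
--                 filtered.append(meal)
--         if len(filtered) > 0:
--             return filtered
--
--     # if no cost tags exist at all, return original
--     return meals
-- ===== SOURCE B (Python) =====
-- def filter_budget(meals, budget):
--     if budget is None:
--         budget = "medium"
--     budget = str(budget).lower()
--
--     if budget == "low":
--         order = ["cost_low", "cost_medium", "cost_high"]
--     elif budget == "medium":
--         order = ["cost_medium", "cost_low", "cost_high"]
--     else:
--         # high budget: no need to restrict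
--         return meals
--
--     # rank of a meal = index of the strictest tier its tags reach (3 = none)
--     ranks = [min((i for i, t in enumerate(order) if t in meal.get("tags", [])), default=3)
--              for meal in meals]
--     best = min(ranks, default=3)
--     if best > 2:
--         # no cost tags exist at all
--         return meals
--     return [meal for meal, r in zip(meals, ranks) if r <= best]
-- ===== Notes on version B (the rewrite author's own statement) =====
-- stated objective: alternative
-- what changed: A runs up to three separate filtering passes over all meals (strict tier, then relaxed, then fully relaxed, each restarting from scratch); B instead ranks each meal once by the strictest budget tier its tags reach, takes the minimum rank, and keeps the meals at that rank (falling back to all meals when nothing matches).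
import Mathlib
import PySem

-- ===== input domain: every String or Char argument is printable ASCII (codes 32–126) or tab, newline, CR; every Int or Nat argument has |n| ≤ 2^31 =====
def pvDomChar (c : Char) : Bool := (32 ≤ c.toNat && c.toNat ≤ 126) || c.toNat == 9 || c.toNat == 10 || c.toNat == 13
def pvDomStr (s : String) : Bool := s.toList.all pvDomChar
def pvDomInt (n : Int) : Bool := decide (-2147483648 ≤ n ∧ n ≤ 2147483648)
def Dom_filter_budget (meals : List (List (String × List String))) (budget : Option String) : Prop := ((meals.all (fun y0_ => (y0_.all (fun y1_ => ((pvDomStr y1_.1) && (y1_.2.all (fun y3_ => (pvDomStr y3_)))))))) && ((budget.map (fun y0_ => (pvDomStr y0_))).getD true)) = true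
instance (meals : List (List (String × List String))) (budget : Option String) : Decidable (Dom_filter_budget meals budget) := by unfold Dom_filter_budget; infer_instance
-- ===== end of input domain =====

-- B replaces A's three restart-from-scratch filtering passes by one ranking pass
-- (rank = strictest tier a meal's tags reach, minimum rank picked once); same results.

-- meal.get("tags", []) — shared by both ports (both Pythons do this lookup)
def pvGetTags (meal : List (String × List String)) : List String :=
  (PySem.Dict.mk meal).getD "tags" []

-- ===== PORT A =====
-- 'for allowed in preferred_orders: filtered = […]; if len(filtered) > 0: return filtered' / else return meals
def pvTryOrders (meals : List (List (String × List String))) :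
    List (List String) → List (List (String × List String))
  | [] => meals
  | allowed :: rest =>
    let filtered := meals.foldl
      (fun acc meal =>
        if allowed.any (fun costTag => (pvGetTags meal).contains costTag)
        then acc ++ [meal] else acc) []
    if filtered.length > 0 then filtered else pvTryOrders meals rest

def filter_budget (meals : List (List (String × List String))) (budget : Option String) : List (List (String × List String)) :=
  let b := PySem.Str.lower (budget.getD "medium")
  if b = "low" then
    pvTryOrders meals [["cost_low"], ["cost_low", "cost_medium"],
      ["cost_low", "cost_medium", "cost_high"]]
  else if b = "medium" then
    pvTryOrders meals [["cost_medium"], ["cost_medium", "cost_low"],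
      ["cost_medium", "cost_low", "cost_high"]]
  else
    meals

-- ===== PORT B =====
-- min((i for i, t in enumerate(order) if t in meal.get("tags", [])), default=3)
def pvRank (order : List String) (meal : List (String × List String)) : Int :=
  PySem.List.minD
    ((PySem.List.enumerate order).filterMap
      (fun p => if (pvGetTags meal).contains p.2 then some p.1 else none))
    (fun x => x) 3

def pvRankCore (meals : List (List (String × List String))) (order : List String) :
    List (List (String × List String)) :=
  let ranks := meals.map (fun meal => pvRank order meal)
  let best := PySem.List.minD ranks (fun x => x) 3
  if best > 2 then meals
  else (meals.zip ranks).filterMap (fun p => if p.2 ≤ best then some p.1 else none)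

def filter_budget_alt (meals : List (List (String × List String))) (budget : Option String) : List (List (String × List String)) :=
  let b := PySem.Str.lower (budget.getD "medium")
  if b = "low" then pvRankCore meals ["cost_low", "cost_medium", "cost_high"]
  else if b = "medium" then pvRankCore meals ["cost_medium", "cost_low", "cost_high"]
  else meals

-- ===== PRECONDITION & SPEC =====
def Spec_filter_budget (meals : List (List (String × List String))) (budget : Option String) (out : List (List (String × List String))) : Prop := out = filter_budget_alt meals budget
instance (meals : List (List (String × List String))) (budget : Option String) (out : List (List (String × List String))) : Decidable (Spec_filter_budget meals budget out) := by unfold Spec_filter_budget; infer_instance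

-- ===== CLAIM (what is proved, stated in full; the proofs are below) =====
def Claim_equal_filter_budget : Prop := ∀ (meals : List (List (String × List String))) (budget : Option String), Dom_filter_budget meals budget → Spec_filter_budget meals budget (filter_budget meals budget)

-- ===== LEMMAS AND PROOFS =====

-- rank against a 3-element order, written out as a case chain
theorem pvRank_three (a b c : String) (meal : List (String × List String)) :
    pvRank [a, b, c] meal =
      if (pvGetTags meal).contains a then 0
      else if (pvGetTags meal).contains b then 1
      else if (pvGetTags meal).contains c then 2
      else 3 := by
  cases h1 : (pvGetTags meal).contains a <;>
    cases h2 : (pvGetTags meal).contains b <;>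
      cases h3 : (pvGetTags meal).contains c <;>
        simp only [List.contains_eq_mem, decide_eq_false_iff_not, decide_eq_true_eq] at h1 h2 h3 <;>
        simp [pvRank, PySem.List.enumerate, PySem.List.minD, PySem.List.min?, h1, h2, h3]

-- matching a prefix of the order = rank small enough
theorem pvAny_take (a b c : String) (meal : List (String × List String)) :
    ([a].any (fun t => (pvGetTags meal).contains t) = decide (pvRank [a, b, c] meal ≤ 0)) ∧
    ([a, b].any (fun t => (pvGetTags meal).contains t) = decide (pvRank [a, b, c] meal ≤ 1)) ∧
    ([a, b, c].any (fun t => (pvGetTags meal).contains t) = decide (pvRank [a, b, c] meal ≤ 2)) := by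
  rw [pvRank_three]
  cases h1 : (pvGetTags meal).contains a <;>
    cases h2 : (pvGetTags meal).contains b <;>
      cases h3 : (pvGetTags meal).contains c <;>
        simp only [List.contains_eq_mem, decide_eq_false_iff_not, decide_eq_true_eq] at h1 h2 h3 <;>
        simp [h1, h2, h3]

-- B's zip-filter is a plain filter on the rank
theorem pvZipFilter (r : List (String × List String) → Int) (best : Int)
    (meals : List (List (String × List String))) :
    ((meals.zip (meals.map r)).filterMap
        (fun p => if p.2 ≤ best then some p.1 else none)) =
      meals.filter (fun m => decide (r m ≤ best)) := by
  induction meals with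
  | nil => rfl
  | cons m t ih =>
    by_cases h : r m ≤ best <;> simp [h, ih]

-- each rank is between 0 and 3
theorem pvRank_le_three (a b c : String) (meal : List (String × List String)) :
    pvRank [a, b, c] meal ≤ 3 := by
  rw [pvRank_three]; split_ifs <;> omega

theorem pvRank_nonneg (a b c : String) (meal : List (String × List String)) :
    0 ≤ pvRank [a, b, c] meal := by
  rw [pvRank_three]; split_ifs <;> omega

-- minD characterisation on a mapped list with ranks ≤ 3
theorem pvBest_le_iff (r : List (String × List String) → Int)
    (meals : List (List (String × List String))) (i : Int) (hi : i < 3) :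
    (PySem.List.minD (meals.map r) (fun x => x) 3 ≤ i) ↔
      ∃ m ∈ meals, r m ≤ i := by
  unfold PySem.List.minD
  cases h : PySem.List.min? (meals.map r) (fun x => x) with
  | none =>
    rw [PySem.List.min?_eq_none_iff] at h
    simp [List.map_eq_nil_iff.mp h]
    omega
  | some v =>
    have hmem := PySem.List.min?_mem h
    have hmin := PySem.List.min?_isMin h
    simp only [Option.getD_some]
    constructor
    · intro hv
      obtain ⟨m, hm, hrm⟩ := List.mem_map.mp hmem
      exact ⟨m, hm, by omega⟩
    · rintro ⟨m, hm, hrm⟩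
      have := hmin (r m) (List.mem_map_of_mem hm)
      simp at this; omega

-- A's one filtering pass is a filter
theorem pvPass (allowed : List String) (meals : List (List (String × List String))) :
    meals.foldl
      (fun acc meal =>
        if allowed.any (fun costTag => (pvGetTags meal).contains costTag)
        then acc ++ [meal] else acc) [] =
      meals.filter (fun meal => allowed.any (fun costTag => (pvGetTags meal).contains costTag)) := by
  simpa using PySem.List.foldl_append_if_eq_filter
    (fun meal => allowed.any (fun costTag => (pvGetTags meal).contains costTag)) meals []

-- the heart: A's three-pass fallback equals B's one ranking pass
theorem pvMain (a b c : String) (meals : List (List (String × List String))) :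
    pvTryOrders meals [[a], [a, b], [a, b, c]] = pvRankCore meals [a, b, c] := by
  set r : List (String × List String) → Int := fun m => pvRank [a, b, c] m
  have hany : ∀ m, _ := fun m => pvAny_take a b c m
  have hfix : ∀ (allowed : List String) (i : Int),
      (∀ m, allowed.any (fun t => (pvGetTags m).contains t) = decide (r m ≤ i)) →
      meals.filter (fun meal => allowed.any (fun t => (pvGetTags meal).contains t)) =
        meals.filter (fun m => decide (r m ≤ i)) := by
    intro allowed i h
    exact List.filter_congr (fun m _ => h m)
  have hle3 : ∀ m ∈ meals, r m ≤ 3 := fun m _ => pvRank_le_three a b c m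
  set best := PySem.List.minD (meals.map r) (fun x => x) 3 with hbestdef
  have hble : best ≤ 3 := by
    unfold PySem.List.minD at hbestdef
    cases h : PySem.List.min? (meals.map r) (fun x => x) with
    | none => simp [hbestdef, h]
    | some v =>
      have hmem := PySem.List.min?_mem h
      obtain ⟨m, hm, hrm⟩ := List.mem_map.mp hmem
      rw [hbestdef, h]
      simp only [Option.getD_some]
      rw [← hrm]; exact hle3 m hm
  have hge0 : ∀ m ∈ meals, 0 ≤ r m := fun m _ => pvRank_nonneg a b c m
  have hbge : 0 ≤ best := by
    unfold PySem.List.minD at hbestdef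
    cases h : PySem.List.min? (meals.map r) (fun x => x) with
    | none => simp [hbestdef, h]
    | some v =>
      have hmem := PySem.List.min?_mem h
      obtain ⟨m, hm, hrm⟩ := List.mem_map.mp hmem
      rw [hbestdef, h]
      simp only [Option.getD_some]
      rw [← hrm]; exact hge0 m hm
  -- empty/non-empty filters in terms of best
  have hfilt : ∀ i : Int, i < 3 →
      ((meals.filter (fun m => decide (r m ≤ i))) ≠ [] ↔ best ≤ i) := by
    intro i hi
    rw [hbestdef, pvBest_le_iff r meals i hi]
    constructor
    · intro h
      obtain ⟨m, hm⟩ := List.exists_mem_of_ne_nil _ h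
      have := List.mem_filter.mp hm
      exact ⟨m, this.1, by simpa using this.2⟩
    · rintro ⟨m, hm, hrm⟩ h
      have := List.filter_eq_nil_iff.mp h m hm
      simp at this; omega
  -- unfold B
  show pvTryOrders meals [[a], [a, b], [a, b, c]] =
    (if best > 2 then meals
     else (meals.zip (meals.map r)).filterMap (fun p => if p.2 ≤ best then some p.1 else none))
  rw [pvZipFilter r best meals]
  simp only [pvTryOrders, pvPass]
  rw [hfix [a] 0 (fun m => (hany m).1), hfix [a, b] 1 (fun m => (hany m).2.1),
      hfix [a, b, c] 2 (fun m => (hany m).2.2)]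
  by_cases h0 : best ≤ 0
  · have hne := (hfilt 0 (by omega)).mpr h0
    have hb2 : ¬ best > 2 := by omega
    rw [if_pos (by
      rcases List.exists_mem_of_ne_nil _ hne with ⟨m, hm⟩
      exact List.length_pos_of_mem hm)]
    rw [if_neg hb2]
    refine (List.filter_congr ?_)
    intro m hm; simp only [decide_eq_decide]
    have := hge0 m hm
    omega
  · have he0 : meals.filter (fun m => decide (r m ≤ 0)) = [] := by
      by_contra h; exact h0 ((hfilt 0 (by omega)).mp h)
    rw [he0]
    simp only [List.length_nil, lt_self_iff_false, if_false]
    by_cases h1 : best ≤ 1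
    · have hbe : best = 1 := by omega
      have hne := (hfilt 1 (by omega)).mpr h1
      rw [if_pos (by
        rcases List.exists_mem_of_ne_nil _ hne with ⟨m, hm⟩
        exact List.length_pos_of_mem hm)]
      rw [if_neg (by omega)]
      exact List.filter_congr (fun m _ => by simp only [decide_eq_decide]; omega)
    · have he1 : meals.filter (fun m => decide (r m ≤ 1)) = [] := by
        by_contra h; exact h1 ((hfilt 1 (by omega)).mp h)
      rw [he1]
      simp only [List.length_nil, lt_self_iff_false, if_false]
      by_cases h2 : best ≤ 2
      · have hbe : best = 2 := by omega
        have hne := (hfilt 2 (by omega)).mpr h2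
        rw [if_pos (by
          rcases List.exists_mem_of_ne_nil _ hne with ⟨m, hm⟩
          exact List.length_pos_of_mem hm)]
        rw [if_neg (by omega)]
        exact List.filter_congr (fun m _ => by simp only [decide_eq_decide]; omega)
      · have he2 : meals.filter (fun m => decide (r m ≤ 2)) = [] := by
          by_contra h; exact h2 ((hfilt 2 (by omega)).mp h)
        rw [he2]
        simp only [List.length_nil, lt_self_iff_false, if_false]
        rw [if_pos (by omega)]

-- ===== VERDICT (by name: the statement is the Claim_ definition above) =====
theorem filter_budget_spec : Claim_equal_filter_budget := by
  intro meals budget _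
  unfold Spec_filter_budget filter_budget filter_budget_alt
  by_cases hl : PySem.Str.lower (budget.getD "medium") = "low"
  · simp only [hl]
    simp only [if_true]
    exact pvMain "cost_low" "cost_medium" "cost_high" meals
  · by_cases hm : PySem.Str.lower (budget.getD "medium") = "medium"
    · simp only [hm]
      exact pvMain "cost_medium" "cost_low" "cost_high" meals
    · simp [if_neg hl, if_neg hm]
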